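-- pv_equiv track=rewrite | github.com/iulianbute/ebs | dataProcessor.py | getEnvironment
-- ===== SOURCE A (Python) =====
-- def getEnvironment(scenes):
--     # calculeaza 'mediul inconjurator' din scene
--     scenesNo = len(scenes[0])
--     alfaNo = len(scenes[0][0])
--     envScene = []
--     envDist = lambda scns,snsInd,dstInd: max([scns[scnInd][snsInd][dstInd] for scnInd in range(len(scns))])
--     for sensId in range(scenesNo):
--         envScene.append([envDist(scenes, sensId, alfa) for alfa in range(alfaNo)])
--     return envScene
-- ===== SOURCE B (Python) =====
-- def getEnvironment(scenes):
--     # single sweep: start from the first scene, keep a running element-wise max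
--     first = scenes[0]
--     alfaNo = len(first[0])
--     env = [[row[a] for a in range(alfaNo)] for row in first]
--     for scene in scenes[1:]:
--         env = [[v if v >= scene[s][a] else scene[s][a] for a, v in enumerate(row)]
--                for s, row in enumerate(env)]
--     return env
-- ===== Notes on version B (the rewrite author's own statement) =====
-- stated objective: alternative
-- what changed: Instead of recomputing a per-cell max by scanning all scenes for every (sensor,alfa) pair (building a temporary list and calling max() per cell), B initializes the grid from the first scene and folds the remaining scenes once, maintaining a running element-wise maximum with a single comparison per cell per scene.
import Mathlib
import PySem

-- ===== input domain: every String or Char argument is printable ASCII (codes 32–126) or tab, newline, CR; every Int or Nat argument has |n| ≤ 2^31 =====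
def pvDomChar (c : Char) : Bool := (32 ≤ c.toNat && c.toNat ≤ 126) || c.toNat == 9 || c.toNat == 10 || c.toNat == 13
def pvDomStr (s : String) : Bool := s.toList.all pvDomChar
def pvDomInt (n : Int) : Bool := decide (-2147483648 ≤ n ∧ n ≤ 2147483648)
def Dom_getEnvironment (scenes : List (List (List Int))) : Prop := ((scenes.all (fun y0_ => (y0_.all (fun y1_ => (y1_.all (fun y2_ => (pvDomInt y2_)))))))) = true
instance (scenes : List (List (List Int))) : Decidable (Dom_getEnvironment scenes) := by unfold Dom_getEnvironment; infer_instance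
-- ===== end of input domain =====

-- B replaces A's per-cell rescans of all scenes by one fold over the scenes keeping a running
-- element-wise maximum (alternative decomposition, same asymptotic cost); return values only, no mutation.

-- ===== PORT A =====
-- All Python indices below come from `range(len(..))` and are in range under Pre_,
-- so `List.getD` (with an irrelevant default) is exact there; `max(list)` on a
-- nonempty list is `PySem.List.max?` with the identity key.
def getEnvironment (scenes : List (List (List Int))) : List (List Int) :=
  let scenesNo := (scenes.getD 0 []).length
  let alfaNo := ((scenes.getD 0 []).getD 0 []).length
  let envDist : List (List (List Int)) → Nat → Nat → Int := fun scns snsInd dstInd =>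
    (PySem.List.max?
      ((List.range scns.length).map
        (fun scnInd => ((scns.getD scnInd []).getD snsInd []).getD dstInd 0))
      (fun y => y)).getD 0
  (List.range scenesNo).foldl
    (fun envScene sensId =>
      envScene ++ [(List.range alfaNo).map (fun alfa => envDist scenes sensId alfa)]) []

-- ===== PORT B =====
-- `scenes[1:]` is `List.drop 1`; `range(alfaNo)` over an in-range row index uses `getD` (exact
-- under Pre_, where every row reaches alfaNo entries); `enumerate` is `PySem.List.enumerate`
-- and `scene[s]` / `scene[s][a]` with its Int indices is `PySem.List.pyGetD` (exact under Pre_).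
def getEnvironment_alt (scenes : List (List (List Int))) : List (List Int) :=
  let first := scenes.getD 0 []
  let alfaNo := (first.getD 0 []).length
  let env0 := first.map (fun row => (List.range alfaNo).map (fun a => row.getD a 0))
  (scenes.drop 1).foldl
    (fun env scene =>
      (PySem.List.enumerate env).map (fun p =>
        (PySem.List.enumerate p.2).map (fun q =>
          if q.2 ≥ PySem.List.pyGetD (PySem.List.pyGetD scene p.1 []) q.1 0 then q.2
          else PySem.List.pyGetD (PySem.List.pyGetD scene p.1 []) q.1 0)))
    env0

-- ===== PRECONDITION & SPEC =====
-- Pre_ is exactly where the Python A returns: scenes and scenes[0] nonempty (else IndexError on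
-- scenes[0] / scenes[0][0]) and every scene at least len(scenes[0]) rows of at least
-- len(scenes[0][0]) entries (else IndexError inside envDist).
def Pre_getEnvironment (scenes : List (List (List Int))) : Prop :=
  scenes ≠ [] ∧ scenes.getD 0 [] ≠ [] ∧
  ∀ sc ∈ scenes, (scenes.getD 0 []).length ≤ sc.length ∧
    ∀ s < (scenes.getD 0 []).length,
      ((scenes.getD 0 []).getD 0 []).length ≤ (sc.getD s []).length
instance (scenes : List (List (List Int))) : Decidable (Pre_getEnvironment scenes) := by
  unfold Pre_getEnvironment; infer_instance
def pvWitness_getEnvironment : List (List (List Int)) := [[[1, 2], [3, 4]], [[5, 0], [1, 7]]]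
def Spec_getEnvironment (scenes : List (List (List Int))) (out : List (List Int)) : Prop := out = getEnvironment_alt scenes
instance (scenes : List (List (List Int))) (out : List (List Int)) : Decidable (Spec_getEnvironment scenes out) := by unfold Spec_getEnvironment; infer_instance

-- ===== CLAIM (what is proved, stated in full; the proofs are below) =====
def Claim_equal_getEnvironment : Prop := ∀ (scenes : List (List (List Int))), Dom_getEnvironment scenes → Pre_getEnvironment scenes → Spec_getEnvironment scenes (getEnvironment scenes)

-- ===== LEMMAS AND PROOFS =====

/-- A grid given by a function on (row, column) indices. -/
def mkGrid (R C : Nat) (g : Nat → Nat → Int) : List (List Int) :=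
  (List.range R).map (fun s => (List.range C).map (fun a => g s a))

/-- Entry (s, a) of a scene, via the defaults used in the ports. -/
def cell (sc : List (List Int)) (s a : Nat) : Int := (sc.getD s []).getD a 0

lemma range_map_getD {α : Type} (l : List α) (d : α) :
    (List.range l.length).map (fun k => l.getD k d) = l := by
  apply List.ext_getElem
  · simp
  · intro i h1 h2
    simp [List.getElem?_eq_getElem h2]

lemma map_eq_map_range_getD (l : List (List Int)) (f : List Int → List Int) :
    l.map f = (List.range l.length).map (fun s => f (l.getD s [])) := by
  conv_lhs => rw [← range_map_getD l []]
  rw [List.map_map]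
  rfl

lemma max_eq_if (m x : Int) : max m x = if x ≤ m then m else x := by
  by_cases h : x ≤ m
  · rw [if_pos h, max_eq_left h]
  · rw [if_neg h, max_eq_right (le_of_not_ge h)]

lemma mkGrid_congr (R C : Nat) (g1 g2 : Nat → Nat → Int)
    (h : ∀ s a, g1 s a = g2 s a) : mkGrid R C g1 = mkGrid R C g2 := by
  unfold mkGrid
  simp only [h]

lemma step_mkGrid (R C : Nat) (g : Nat → Nat → Int) (scene : List (List Int)) :
    (PySem.List.enumerate (mkGrid R C g)).map (fun p =>
        (PySem.List.enumerate p.2).map (fun q =>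
          if q.2 ≥ PySem.List.pyGetD (PySem.List.pyGetD scene p.1 []) q.1 0 then q.2
          else PySem.List.pyGetD (PySem.List.pyGetD scene p.1 []) q.1 0)) =
      mkGrid R C (fun s a => max (g s a) (cell scene s a)) := by
  apply List.ext_getElem
  · simp [mkGrid, PySem.List.length_enumerate]
  · intro s h1 h2
    simp only [mkGrid, List.length_map, List.length_range] at h2
    have hsR : s < (mkGrid R C g).length := by simp [mkGrid, h2]
    simp only [List.getElem_map, PySem.List.getElem_enumerate]
    apply List.ext_getElem
    · simp [mkGrid, PySem.List.length_enumerate]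
    · intro a g1 g2
      simp only [mkGrid, List.getElem_map, List.getElem_range,
        List.length_map, List.length_range] at g1 g2 ⊢
      simp [PySem.List.getElem_enumerate, cell, max_eq_if]

lemma foldl_step_mkGrid (R C : Nat) (rest : List (List (List Int))) :
    ∀ g : Nat → Nat → Int,
      rest.foldl
        (fun env scene =>
          (PySem.List.enumerate env).map (fun p =>
            (PySem.List.enumerate p.2).map (fun q =>
              if q.2 ≥ PySem.List.pyGetD (PySem.List.pyGetD scene p.1 []) q.1 0 then q.2
              else PySem.List.pyGetD (PySem.List.pyGetD scene p.1 []) q.1 0)))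
        (mkGrid R C g) =
      mkGrid R C (fun s a => rest.foldl (fun m sc => max m (cell sc s a)) (g s a)) := by
  induction rest with
  | nil => intro g; simp
  | cons sc rest ih =>
    intro g
    rw [List.foldl_cons, step_mkGrid R C g sc, ih]
    apply mkGrid_congr
    intro s a
    rw [List.foldl_cons]

lemma A_char (sc0 : List (List Int)) (rest : List (List (List Int))) :
    getEnvironment (sc0 :: rest) =
      mkGrid sc0.length (sc0.getD 0 []).length
        (fun s a => rest.foldl (fun m sc => max m (cell sc s a)) (cell sc0 s a)) := by
  unfold getEnvironment
  simp only [List.getD_cons_zero]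
  rw [PySem.List.foldl_append_singleton_eq_map]
  unfold mkGrid
  apply List.map_congr_left
  intro s hs
  apply List.map_congr_left
  intro a ha
  have hlist : (List.range (sc0 :: rest).length).map
      (fun scnInd => (((sc0 :: rest).getD scnInd []).getD s []).getD a 0)
      = cell sc0 s a :: rest.map (fun sc => cell sc s a) := by
    rw [show (sc0 :: rest).length = rest.length + 1 from rfl, List.range_succ_eq_map]
    simp only [List.map_cons, List.map_map, List.getD_cons_zero, cell]
    congr 1
    conv_rhs => rw [← range_map_getD rest [], List.map_map]
    rfl
  rw [hlist, PySem.List.max?_id_cons, Option.getD_some, List.foldl_map]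

lemma B_char (sc0 : List (List Int)) (rest : List (List (List Int))) :
    getEnvironment_alt (sc0 :: rest) =
      mkGrid sc0.length (sc0.getD 0 []).length
        (fun s a => rest.foldl (fun m sc => max m (cell sc s a)) (cell sc0 s a)) := by
  unfold getEnvironment_alt
  simp only [List.getD_cons_zero, List.drop_one, List.tail_cons]
  rw [map_eq_map_range_getD sc0
    (fun row => (List.range (sc0.getD 0 []).length).map (fun a => row.getD a 0))]
  exact foldl_step_mkGrid sc0.length (sc0.getD 0 []).length rest (cell sc0)

-- ===== VERDICT (by name: the statement is the Claim_ definition above) =====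
theorem getEnvironment_spec : Claim_equal_getEnvironment := by
  intro scenes _ _
  unfold Spec_getEnvironment
  cases scenes with
  | nil => rfl
  | cons sc0 rest => rw [A_char, B_char]
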